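-- pv_equiv track=rewrite | github.com/rayz1065/competitive-programming | uva/introduction/life-problems-easier/traffic-lights/main.py | solve
-- ===== SOURCE A (Python) =====
-- MAX_TIME = 5 * 3600
--
-- def is_green (cycle, t):
--     # green in time [0, cycle - 5)
--     time_since_start = t % (2 * cycle)
--     return 0 <= time_since_start < cycle - 5
--
-- def is_sync (cycles, t):
--     return all(is_green(cycle, t) for cycle in cycles)
--
-- def solve (cycles):
--     for start_t in range(MAX_TIME + 1):
--         if not is_sync(cycles, start_t):
--             break
--     for t in range(start_t + 1, MAX_TIME + 1):
--         if is_sync(cycles, t):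
--             return t
--     return None
-- ===== SOURCE B (Python) =====
-- MAX_TIME = 5 * 3600
--
-- def solve(cycles):
--     # A light with cycle <= 5 is never green, so time 0 is already desynced
--     # and no later moment can be fully green.
--     if any(c <= 5 for c in cycles):
--         return None
--     if not cycles:
--         return None
--     # All cycles >= 6: everyone is green on [0, c-5), so the first desync
--     # moment is exactly min(cycles) - 5 (closed form, no first scan needed).
--     first_desync = min(cycles) - 5
--     for t in range(first_desync + 1, MAX_TIME + 1):
--         if all(t % (2 * c) < c - 5 for c in cycles):
--             return t
--     return None
-- ===== Notes on version B (the rewrite author's own statement) =====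
-- stated objective: faster
-- what changed: B replaces A's first scan over all 18001 seconds (looking for the first desynchronised moment) by a closed form: if any cycle is <= 5 some light is never green so the answer is None, otherwise the first desync is exactly min(cycles)-5, and the single remaining search loop starts right after it.
import Mathlib
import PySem

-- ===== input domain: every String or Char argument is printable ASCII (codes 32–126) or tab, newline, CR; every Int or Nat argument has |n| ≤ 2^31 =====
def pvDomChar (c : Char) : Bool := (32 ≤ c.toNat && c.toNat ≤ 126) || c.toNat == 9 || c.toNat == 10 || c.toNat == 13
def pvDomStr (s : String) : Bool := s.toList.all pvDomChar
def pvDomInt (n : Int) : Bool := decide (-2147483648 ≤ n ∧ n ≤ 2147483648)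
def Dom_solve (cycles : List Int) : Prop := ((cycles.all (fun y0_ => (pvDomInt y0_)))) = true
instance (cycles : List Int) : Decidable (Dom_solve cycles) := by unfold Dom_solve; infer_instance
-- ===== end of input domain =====

-- B replaces A's first scan (find the first desynchronised second) by the closed form
-- min(cycles) - 5 after ruling out never-green lights (cycle <= 5); objective: alternative/simpler.

-- ===== PORT A =====
def pvMAX_TIME : Int := 5 * 3600

def isGreen (cycle t : Int) : Bool :=
  let time_since_start := PySem.Int.mod t (2 * cycle)
  decide (0 ≤ time_since_start) && decide (time_since_start < cycle - 5)

def isSync (cycles : List Int) (t : Int) : Bool :=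
  cycles.all (fun cycle => isGreen cycle t)

-- 'for start_t in range(...): if not is_sync: break' — returns the loop variable at break,
-- or its last value when the loop runs out (range(MAX_TIME+1) is never empty).
def loop1A (cycles : List Int) : List Int → Int → Int
  | [], last => last
  | t :: rest, _ => if !(isSync cycles t) then t else loop1A cycles rest t

-- 'for t in range(start_t + 1, ...): if is_sync: return t' then 'return None'
def loop2A (cycles : List Int) : List Int → Option Int
  | [] => none
  | t :: rest => if isSync cycles t then some t else loop2A cycles rest

def solve (cycles : List Int) : Option Int :=
  loop2A cycles (PySem.List.pyRange
    (loop1A cycles (PySem.List.pyRange 0 (pvMAX_TIME + 1) 1) 0 + 1) (pvMAX_TIME + 1) 1)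

-- ===== PORT B =====
def allGreenB (cycles : List Int) (t : Int) : Bool :=
  cycles.all (fun c => decide (PySem.Int.mod t (2 * c) < c - 5))

def searchB (cycles : List Int) : List Int → Option Int
  | [] => none
  | t :: rest => if allGreenB cycles t then some t else searchB cycles rest

def solve_alt (cycles : List Int) : Option Int :=
  if cycles.any (fun c => decide (c ≤ 5)) then none
  else if cycles.isEmpty then none
  else
    match PySem.List.min? cycles (fun x => x) with
    | none => none   -- unreachable: cycles nonempty
    | some m => searchB cycles (PySem.List.pyRange (m - 5 + 1) (pvMAX_TIME + 1) 1)

-- ===== PRECONDITION & SPEC =====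
-- Pre_ excludes exactly the inputs on which A raises ZeroDivisionError: those whose first
-- zero cycle is preceded only by cycles > 5 (so the short-circuiting all() reaches 0 % 0).
def Pre_solve (cycles : List Int) : Prop :=
  (0 : Int) ∈ cycles → ∃ c ∈ cycles.takeWhile (fun c => c ≠ 0), c ≤ 5
instance (cycles : List Int) : Decidable (Pre_solve cycles) := by unfold Pre_solve; infer_instance

def pvWitness_solve : List Int := [6, 7]

def Spec_solve (cycles : List Int) (out : Option Int) : Prop := out = solve_alt cycles
instance (cycles : List Int) (out : Option Int) : Decidable (Spec_solve cycles out) := by unfold Spec_solve; infer_instance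

-- ===== CLAIM (what is proved, stated in full; the proofs are below) =====
def Claim_equal_solve : Prop := ∀ (cycles : List Int), Dom_solve cycles → Pre_solve cycles → Spec_solve cycles (solve cycles)

-- ===== LEMMAS AND PROOFS =====

-- a light with cycle ≤ 5 is never green
lemma isGreen_false_of_le_five {c : Int} (h : c ≤ 5) (t : Int) : isGreen c t = false := by
  simp only [isGreen, Bool.and_eq_false_iff, decide_eq_false_iff_not, not_le, not_lt]
  omega

lemma isSync_false_of_mem_le_five {cycles : List Int} {c : Int} (hc : c ∈ cycles) (h : c ≤ 5)
    (t : Int) : isSync cycles t = false := by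
  simp only [isSync, List.all_eq_false]
  exact ⟨c, hc, by simp [isGreen_false_of_le_five h]⟩

lemma loop2A_none {cycles : List Int} (l : List Int)
    (h : ∀ t ∈ l, isSync cycles t = false) : loop2A cycles l = none := by
  induction l with
  | nil => rfl
  | cons t rest ih =>
      simp only [loop2A, h t (by simp)]
      exact ih (fun t' ht' => h t' (by simp [ht']))

-- mod reduces to the identity below a positive modulus
lemma mod_self_of_lt {t b : Int} (h0 : 0 ≤ t) (hb : t < b) : PySem.Int.mod t b = t := by
  rw [PySem.Int.mod_eq_emod_of_pos (by omega)]
  exact Int.emod_eq_of_lt h0 hb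

-- all cycles ≥ 6, t in [0, min-5): every light green
lemma isSync_true_below {cycles : List Int} {m : Int}
    (hmin : ∀ c ∈ cycles, m ≤ c) (hge : ∀ c ∈ cycles, 5 < c)
    {t : Int} (h0 : 0 ≤ t) (ht : t < m - 5) : isSync cycles t = true := by
  simp only [isSync, List.all_eq_true]
  intro c hc
  have h5 := hge c hc
  have hm := hmin c hc
  simp only [isGreen, Bool.and_eq_true, decide_eq_true_eq]
  rw [mod_self_of_lt h0 (by omega)]
  omega

lemma isSync_false_at_min {cycles : List Int} {m : Int}
    (hmem : m ∈ cycles) (h5 : 5 < m) : isSync cycles (m - 5) = false := by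
  simp only [isSync, List.all_eq_false]
  refine ⟨m, hmem, ?_⟩
  simp only [isGreen, Bool.and_eq_true, decide_eq_true_eq, not_and, not_lt]
  rw [mod_self_of_lt (by omega) (by omega)]
  omega

-- loop1A on a range where every element is sync: returns the last element (or acc if empty)
lemma loop1A_all_sync {cycles : List Int} (a b acc : Int)
    (h : ∀ t, a ≤ t → t < b → isSync cycles t = true) :
    loop1A cycles (PySem.List.pyRange a b 1) acc = if a < b then b - 1 else acc := by
  by_cases hab : a < b
  · have hn : 0 < (b - a).toNat := by omega
    induction hd : (b - a).toNat generalizing a acc with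
    | zero => omega
    | succ n ih =>
        rw [PySem.List.pyRange_one_cons hab, loop1A, h a le_rfl hab, Bool.not_true]
        rw [if_neg (by decide)]
        by_cases hab' : a + 1 < b
        · rw [ih (a + 1) a (fun t h1 h2 => h t (by omega) h2) hab' (by omega) (by omega)]
          simp [hab, hab']
        · have : a + 1 = b := by omega
          rw [← this] at hab' ⊢
          rw [PySem.List.pyRange_one_eq_nil (by omega), loop1A]
          simp
  · rw [PySem.List.pyRange_one_eq_nil (by omega), loop1A, if_neg hab]

-- loop1A finds the first non-sync element d of the range
lemma loop1A_first {cycles : List Int} {d : Int} (b : Int)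
    (hd : isSync cycles d = false)
    (hsync : ∀ t, 0 ≤ t → t < d → isSync cycles t = true) :
    ∀ a acc, 0 ≤ a → a ≤ d → d < b → loop1A cycles (PySem.List.pyRange a b 1) acc = d := by
  intro a acc ha0 had hdb
  induction hn : (d - a).toNat generalizing a acc with
  | zero =>
      have : a = d := by omega
      subst this
      rw [PySem.List.pyRange_one_cons (by omega), loop1A, hd]
      simp
  | succ n ih =>
      rw [PySem.List.pyRange_one_cons (by omega), loop1A,
        hsync a ha0 (by omega), Bool.not_true]
      rw [if_neg (by decide)]
      exact ih (a + 1) a (by omega) (by omega) (by omega)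

-- with every cycle > 5 the two search loops test the same predicate
lemma isGreen_eq_of_gt {c : Int} (h5 : 5 < c) (t : Int) :
    isGreen c t = decide (PySem.Int.mod t (2 * c) < c - 5) := by
  have hnn : (0:Int) ≤ PySem.Int.mod t (2 * c) := PySem.Int.mod_nonneg t (by omega)
  simp [isGreen, hnn]

lemma isSync_eq_allGreenB {cycles : List Int} (hge : ∀ c ∈ cycles, 5 < c) (t : Int) :
    isSync cycles t = allGreenB cycles t := by
  induction cycles with
  | nil => rfl
  | cons c cs ih =>
      simp only [isSync, allGreenB, List.all_cons] at *
      rw [isGreen_eq_of_gt (hge c (by simp)) t, ih (fun c hc => hge c (by simp [hc]))]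

lemma loop2A_eq_searchB {cycles : List Int} (hge : ∀ c ∈ cycles, 5 < c) (l : List Int) :
    loop2A cycles l = searchB cycles l := by
  induction l with
  | nil => rfl
  | cons t rest ih => rw [loop2A, searchB, isSync_eq_allGreenB hge, ih]

-- ===== VERDICT (by name: the statement is the Claim_ definition above) =====
theorem solve_spec : Claim_equal_solve := by
  intro cycles _ _
  unfold Spec_solve solve solve_alt
  by_cases hsmall : ∃ c ∈ cycles, c ≤ 5
  · -- some light is never green: both return none
    obtain ⟨c, hc, hc5⟩ := hsmall
    have hfalse := isSync_false_of_mem_le_five hc hc5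
    rw [if_pos (by simp only [List.any_eq_true, decide_eq_true_eq]; exact ⟨c, hc, hc5⟩)]
    have h1 : loop1A cycles (PySem.List.pyRange 0 (pvMAX_TIME + 1) 1) 0 = 0 := by
      rw [PySem.List.pyRange_one_cons (by norm_num [pvMAX_TIME]), loop1A, hfalse 0]
      simp
    rw [h1]
    exact loop2A_none _ (fun t _ => hfalse t)
  · push Not at hsmall
    rw [if_neg (by simpa using hsmall)]
    match hcy : cycles with
    | [] =>
        -- always sync: first loop runs out at MAX_TIME, second range is empty
        have h1 : loop1A [] (PySem.List.pyRange 0 (pvMAX_TIME + 1) 1) 0 = pvMAX_TIME := by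
          rw [loop1A_all_sync 0 (pvMAX_TIME + 1) 0 (fun t _ _ => by simp [isSync])]
          norm_num [pvMAX_TIME]
        rw [h1, PySem.List.pyRange_one_eq_nil (by omega), loop2A]
        simp
    | c0 :: rest =>
        rw [if_neg (by simp)]
        have hne : c0 :: rest ≠ [] := by simp
        obtain ⟨m, hm⟩ : ∃ m, PySem.List.min? (c0 :: rest) (fun x => x) = some m := by
          cases h : PySem.List.min? (c0 :: rest) (fun x => x) with
          | none => exact absurd ((PySem.List.min?_eq_none_iff _ _).mp h) hne
          | some m => exact ⟨m, rfl⟩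
        rw [hm]
        have hmem : m ∈ c0 :: rest := PySem.List.min?_mem hm
        have hmin : ∀ c ∈ c0 :: rest, m ≤ c := fun c hc => PySem.List.min?_isMin hm c hc
        have hge : ∀ c ∈ c0 :: rest, 5 < c := fun c hc => lt_of_not_ge (fun h => absurd (hsmall c hc) (by omega))
        have hm5 : 5 < m := hge m hmem
        have hdesync := isSync_false_at_min hmem hm5
        have hbelow := fun t h0 ht => isSync_true_below hmin hge (t := t) h0 ht
        by_cases hlate : m - 5 ≤ pvMAX_TIME
        · -- first loop breaks at m - 5
          rw [loop1A_first (pvMAX_TIME + 1) hdesync hbelow 0 0 le_rfl (by omega) (by omega)]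
          exact loop2A_eq_searchB hge _
        · -- desync beyond MAX_TIME: both ranges end up empty / sync everywhere
          have h1 : loop1A (c0 :: rest) (PySem.List.pyRange 0 (pvMAX_TIME + 1) 1) 0 = pvMAX_TIME := by
            rw [loop1A_all_sync 0 (pvMAX_TIME + 1) 0 (fun t h1 h2 => hbelow t h1 (by omega))]
            norm_num [pvMAX_TIME]
          rw [h1, PySem.List.pyRange_one_eq_nil (by omega), loop2A]
          show (none : Option Int) = searchB (c0 :: rest) (PySem.List.pyRange (m - 5 + 1) (pvMAX_TIME + 1) 1)
          rw [PySem.List.pyRange_one_eq_nil (by omega), searchB]
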